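-- pv_equiv track=rewrite | github.com/rafael199610222/bingo-virtual | bingo-virtual.py | guarda_lineas_ganadas
-- ===== SOURCE A (Python) =====
-- def guarda_lineas_ganadas(cartones: list , bolillas_salidas: list, bolillas_usuario: list, guarda_lineas: dict, cantidad_cartas: int, turno: bool) -> dict:
--
--     lineas_carton: int = 0
--     for carton in range(cantidad_cartas):
--         contador_numeros = 0
--         lineas_carton = 0
--         for fila in range(3):
--             for elementos in cartones[carton][fila]:
--                 if turno:
--                         if elementos != '  ':
--                             if elementos in bolillas_salidas and  elementos in bolillas_usuario:
--                                 contador_numeros+=1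
--                                 if contador_numeros == 5:
--                                     contador_numeros = 0
--                                     # numero_lineas_total += 1
--                                     lineas_carton += 1
--                                     guarda_lineas[carton + 1] = lineas_carton
--                             else:
--                                 contador_numeros = 0
--                 else:
--                     if elementos != '  ':
--                             if elementos in bolillas_salidas:
--                                 contador_numeros+=1
--                                 if contador_numeros == 5:
--                                     contador_numeros = 0
--                                     # numero_lineas_total += 1
--                                     lineas_carton += 1
--                                     guarda_lineas[carton + 1] = lineas_carton
--                             else:
--                                contador_numeros = 0
--     return guarda_lineas
-- ===== SOURCE B (Python) =====
-- # Same return value as A; like A it mutates guarda_lineas in place.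
-- def guarda_lineas_ganadas(cartones: list, bolillas_salidas: list, bolillas_usuario: list, guarda_lineas: dict, cantidad_cartas: int, turno: bool) -> dict:
--     for i in range(cantidad_cartas):
--         cells = [c for fila in cartones[i][:3] for c in fila if c != '  ']
--         flags = [c in bolillas_salidas and (not turno or c in bolillas_usuario) for c in cells]
--         runs, cur = [], 0
--         for f in flags:
--             if f:
--                 cur += 1
--             else:
--                 runs.append(cur)
--                 cur = 0
--         runs.append(cur)
--         lineas = sum(r // 5 for r in runs)
--         if lineas > 0:
--             guarda_lineas[i + 1] = lineas
--     return guarda_lineas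
-- ===== Notes on version B (the rewrite author's own statement) =====
-- stated objective: alternative
-- what changed: B replaces A's streak counter that is reset modulo 5 with an eager dict write on every completed line by a run-length decomposition: per card it flattens the first 3 rows, drops blank cells, collects the maximal runs of matched cells, sets the count to the sum of run_length // 5 and writes the dict at most once per card.
import Mathlib
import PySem

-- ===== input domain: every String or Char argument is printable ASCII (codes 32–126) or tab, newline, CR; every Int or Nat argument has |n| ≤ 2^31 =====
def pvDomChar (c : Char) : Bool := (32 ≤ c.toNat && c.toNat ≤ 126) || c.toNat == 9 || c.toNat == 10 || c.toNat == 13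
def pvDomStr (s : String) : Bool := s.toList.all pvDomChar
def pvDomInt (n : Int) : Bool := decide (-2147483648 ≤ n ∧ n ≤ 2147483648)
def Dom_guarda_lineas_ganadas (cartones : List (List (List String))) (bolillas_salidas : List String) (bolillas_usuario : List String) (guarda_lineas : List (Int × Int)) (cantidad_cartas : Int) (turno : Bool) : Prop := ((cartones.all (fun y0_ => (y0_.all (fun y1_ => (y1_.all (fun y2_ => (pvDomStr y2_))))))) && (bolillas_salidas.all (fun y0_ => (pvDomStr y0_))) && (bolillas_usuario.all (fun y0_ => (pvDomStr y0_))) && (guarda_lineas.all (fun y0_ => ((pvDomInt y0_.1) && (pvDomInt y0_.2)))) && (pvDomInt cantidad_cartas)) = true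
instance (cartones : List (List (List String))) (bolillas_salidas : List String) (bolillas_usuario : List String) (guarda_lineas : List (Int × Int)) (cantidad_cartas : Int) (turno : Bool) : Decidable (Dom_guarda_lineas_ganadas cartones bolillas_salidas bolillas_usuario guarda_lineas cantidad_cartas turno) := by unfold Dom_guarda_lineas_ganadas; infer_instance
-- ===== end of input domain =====

-- B replaces A's mod-5 streak counter with eager dict writes by a run-length decomposition
-- (collect maximal matched runs, sum len//5, single write per card); like A, the Python B
-- mutates guarda_lineas in place — the equivalence proved here is about the return value.

-- ===== PORT A =====
-- one element step of A's innermost loop (state: contador_numeros, lineas_carton, dict; k = carton + 1)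
def pvStepA (sal usu : List String) (turno : Bool) (k : Int)
    (st : Int × Int × PySem.Dict Int Int) (e : String) : Int × Int × PySem.Dict Int Int :=
  match st with
  | (cnt, lin, d) =>
    if turno then
      if e ≠ "  " then
        if e ∈ sal ∧ e ∈ usu then
          if cnt + 1 = 5 then (0, lin + 1, d.insert k (lin + 1)) else (cnt + 1, lin, d)
        else (0, lin, d)
      else (cnt, lin, d)
    else
      if e ≠ "  " then
        if e ∈ sal then
          if cnt + 1 = 5 then (0, lin + 1, d.insert k (lin + 1)) else (cnt + 1, lin, d)
        else (0, lin, d)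
      else (cnt, lin, d)

def guarda_lineas_ganadas (cartones : List (List (List String))) (bolillas_salidas : List String) (bolillas_usuario : List String) (guarda_lineas : List (Int × Int)) (cantidad_cartas : Int) (turno : Bool) : List (Int × Int) :=
  ((PySem.List.pyRange 0 cantidad_cartas 1).foldl (fun d carton =>
      let res := (PySem.List.pyRange 0 3 1).foldl (fun st fila =>
          ((PySem.List.pyGet? ((PySem.List.pyGet? cartones carton).getD []) fila).getD []).foldl
            (pvStepA bolillas_salidas bolillas_usuario turno (carton + 1)) st)
        ((0 : Int), (0 : Int), d)
      res.2.2)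
    (PySem.Dict.mk guarda_lineas)).items

-- ===== PORT B =====
-- run lengths of consecutive True flags (B's runs/cur loop, including the trailing run)
def pvRunsB (flags : List Bool) : List Int :=
  let p := flags.foldl (fun (p : List Int × Int) f => if f then (p.1, p.2 + 1) else (p.1 ++ [p.2], 0)) ([], 0)
  p.1 ++ [p.2]

def guarda_lineas_ganadas_alt (cartones : List (List (List String))) (bolillas_salidas : List String) (bolillas_usuario : List String) (guarda_lineas : List (Int × Int)) (cantidad_cartas : Int) (turno : Bool) : List (Int × Int) :=
  ((PySem.List.pyRange 0 cantidad_cartas 1).foldl (fun d i =>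
      let cells := (((PySem.List.pyGet? cartones i).getD []).take 3).flatMap (fun fila => fila.filter (fun c => c ≠ "  "))
      let flags := cells.map (fun c => decide (c ∈ bolillas_salidas ∧ (turno = true → c ∈ bolillas_usuario)))
      let lineas := (pvRunsB flags).foldl (fun s r => s + PySem.Int.floordiv r 5) 0
      if 0 < lineas then d.insert (i + 1) lineas else d)
    (PySem.Dict.mk guarda_lineas)).items

-- ===== PRECONDITION & SPEC =====
-- Pre_ excludes exactly the inputs where A raises IndexError: a requested carton index
-- beyond the list of cartones, or a requested carton with fewer than 3 rows.
def Pre_guarda_lineas_ganadas (cartones : List (List (List String))) (bolillas_salidas : List String) (bolillas_usuario : List String) (guarda_lineas : List (Int × Int)) (cantidad_cartas : Int) (turno : Bool) : Prop :=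
  cantidad_cartas.toNat ≤ cartones.length ∧ ∀ c ∈ cartones.take cantidad_cartas.toNat, 3 ≤ c.length
instance (cartones : List (List (List String))) (bolillas_salidas : List String) (bolillas_usuario : List String) (guarda_lineas : List (Int × Int)) (cantidad_cartas : Int) (turno : Bool) : Decidable (Pre_guarda_lineas_ganadas cartones bolillas_salidas bolillas_usuario guarda_lineas cantidad_cartas turno) := by unfold Pre_guarda_lineas_ganadas; infer_instance

def pvWitness_guarda_lineas_ganadas : List (List (List String)) × List String × List String × (List (Int × Int)) × Int × Bool :=
  ([[["1", "2", "3", "4", "5"], ["6", "  ", "7"], ["8"]]], ["1", "2", "3", "4", "5", "6"], ["2"], [(1, 0)], 1, false)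

def Spec_guarda_lineas_ganadas (cartones : List (List (List String))) (bolillas_salidas : List String) (bolillas_usuario : List String) (guarda_lineas : List (Int × Int)) (cantidad_cartas : Int) (turno : Bool) (out : List (Int × Int)) : Prop := out = guarda_lineas_ganadas_alt cartones bolillas_salidas bolillas_usuario guarda_lineas cantidad_cartas turno
instance (cartones : List (List (List String))) (bolillas_salidas : List String) (bolillas_usuario : List String) (guarda_lineas : List (Int × Int)) (cantidad_cartas : Int) (turno : Bool) (out : List (Int × Int)) : Decidable (Spec_guarda_lineas_ganadas cartones bolillas_salidas bolillas_usuario guarda_lineas cantidad_cartas turno out) := by unfold Spec_guarda_lineas_ganadas; infer_instance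

-- ===== CLAIM (what is proved, stated in full; the proofs are below) =====
def Claim_equal_guarda_lineas_ganadas : Prop := ∀ (cartones : List (List (List String))) (bolillas_salidas : List String) (bolillas_usuario : List String) (guarda_lineas : List (Int × Int)) (cantidad_cartas : Int) (turno : Bool), Dom_guarda_lineas_ganadas cartones bolillas_salidas bolillas_usuario guarda_lineas cantidad_cartas turno → Pre_guarda_lineas_ganadas cartones bolillas_salidas bolillas_usuario guarda_lineas cantidad_cartas turno → Spec_guarda_lineas_ganadas cartones bolillas_salidas bolillas_usuario guarda_lineas cantidad_cartas turno (guarda_lineas_ganadas cartones bolillas_salidas bolillas_usuario guarda_lineas cantidad_cartas turno)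

-- ===== LEMMAS AND PROOFS =====

-- the matched flag of a (non-blank) cell
def pvMatched (sal usu : List String) (turno : Bool) (e : String) : Bool :=
  decide (e ∈ sal ∧ (turno = true → e ∈ usu))

-- A's element step expressed on the flag
def pvStepF (k : Int) (st : Int × Int × PySem.Dict Int Int) (f : Bool) : Int × Int × PySem.Dict Int Int :=
  match st with
  | (cnt, lin, d) =>
    if f then
      if cnt + 1 = 5 then (0, lin + 1, d.insert k (lin + 1)) else (cnt + 1, lin, d)
    else (0, lin, d)

-- flag sequence of a cell list: drop blanks, classify the rest
def pvFlags (sal usu : List String) (turno : Bool) (l : List String) : List Bool :=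
  (l.filter (fun c => c ≠ "  ")).map (pvMatched sal usu turno)

-- lines A adds while scanning a flag list from counter cnt
def pvAdd (cnt : Int) : List Bool → Int
  | [] => 0
  | f :: fs => if f then (if cnt + 1 = 5 then 1 + pvAdd 0 fs else pvAdd (cnt + 1) fs) else pvAdd 0 fs

-- lines by the run decomposition: cur = length of the current open run
def pvS (cur : Int) : List Bool → Int
  | [] => cur / 5
  | f :: fs => if f then pvS (cur + 1) fs else cur / 5 + pvS 0 fs

theorem pv_insert_insert (d : PySem.Dict Int Int) (k v w : Int) :
    (d.insert k v).insert k w = d.insert k w := by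
  apply PySem.Dict.ext
  by_cases h : d.contains k
  · rw [PySem.Dict.items_insert, PySem.Dict.items_insert, PySem.Dict.items_insert]
    simp only [PySem.Dict.contains_insert_self, if_true, h, List.map_map]
    apply List.map_congr_left
    intro p _
    by_cases hp : p.1 = k <;> simp [hp]
  · rw [PySem.Dict.items_insert, PySem.Dict.items_insert, PySem.Dict.items_insert]
    simp only [PySem.Dict.contains_insert_self, if_true, h, if_false, Bool.false_eq_true,
      List.map_append]
    have hnk : k ∉ d.items.map Prod.fst := by
      have hc := PySem.Dict.contains_eq_decide_mem_keys (d := d) (k := k)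
      simp only [PySem.Dict.keys] at hc
      intro hmem
      exact h (by rw [hc]; simpa using hmem)
    have hm : List.map (fun p => if p.1 == k then (k, w) else p) d.items
        = List.map id d.items := by
      apply List.map_congr_left
      intro p hp
      have : p.1 ≠ k := fun hpk => hnk (hpk ▸ List.mem_map_of_mem (f := Prod.fst) hp)
      simp [this]
    simp only [List.map_id] at hm
    simpa using hm

-- A's step is the flag step, skipping blanks
theorem pvStepA_eq (sal usu : List String) (turno : Bool) (k : Int)
    (st : Int × Int × PySem.Dict Int Int) (e : String) :
    pvStepA sal usu turno k st e =
      if e = "  " then st else pvStepF k st (pvMatched sal usu turno e) := by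
  obtain ⟨cnt, lin, d⟩ := st
  cases turno <;> by_cases hb : e = "  " <;>
    by_cases hs : e ∈ sal <;> by_cases hu : e ∈ usu <;>
      simp [pvStepA, pvStepF, pvMatched, hb, hs, hu]

-- A's fold over cells equals the flag fold over pvFlags
theorem pv_foldA_eq_foldF (sal usu : List String) (turno : Bool) (k : Int) :
    ∀ (l : List String) (st : Int × Int × PySem.Dict Int Int),
      l.foldl (pvStepA sal usu turno k) st =
        (pvFlags sal usu turno l).foldl (pvStepF k) st := by
  intro l
  induction l with
  | nil => intro st; simp [pvFlags]
  | cons e l ih =>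
      intro st
      by_cases hb : e = "  " <;>
        simp [List.foldl_cons, pvStepA_eq, pvFlags, hb, ih]

-- the fold invariant: counter runs, lines accumulate, the dict only records the current total
theorem pv_foldF_spec (k : Int) :
    ∀ (fs : List Bool) (cnt lin : Int) (d0 : PySem.Dict Int Int), 0 ≤ lin →
      ∃ c', fs.foldl (pvStepF k) (cnt, lin, if 0 < lin then d0.insert k lin else d0) =
        (c', lin + pvAdd cnt fs,
          if 0 < lin + pvAdd cnt fs then d0.insert k (lin + pvAdd cnt fs) else d0) := by
  intro fs
  induction fs with
  | nil => intro cnt lin d0 _; exact ⟨cnt, by simp [pvAdd]⟩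
  | cons f fs ih =>
      intro cnt lin d0 hlin
      cases f with
      | false =>
          simpa [List.foldl_cons, pvStepF, pvAdd] using ih 0 lin d0 hlin
      | true =>
          by_cases h5 : cnt + 1 = 5
          · have step : pvStepF k (cnt, lin, if 0 < lin then d0.insert k lin else d0) true =
                (0, lin + 1, if 0 < lin + 1 then d0.insert k (lin + 1) else d0) := by
              by_cases hl : 0 < lin <;>
                simp [pvStepF, h5, hl, pv_insert_insert, show (0:Int) < lin + 1 by omega]
            obtain ⟨c', hc⟩ := ih 0 (lin + 1) d0 (by omega)
            refine ⟨c', ?_⟩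
            rw [List.foldl_cons, step, hc]
            have h1 : lin + pvAdd cnt (true :: fs) = lin + 1 + pvAdd 0 fs := by
              simp [pvAdd, h5]; ring
            rw [h1]
          · obtain ⟨c', hc⟩ := ih (cnt + 1) lin d0 hlin
            exact ⟨c', by simpa [List.foldl_cons, pvStepF, pvAdd, h5] using hc⟩

theorem pvS_add5 : ∀ (fs : List Bool) (c : Int), pvS (c + 5) fs = 1 + pvS c fs := by
  intro fs
  induction fs with
  | nil => intro c; simp [pvS]; omega
  | cons f fs ih =>
      intro c
      cases f with
      | false => simp [pvS]; omega
      | true => simp [pvS, show c + 5 + 1 = (c + 1) + 5 by ring, ih]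

theorem pvAdd_eq_pvS : ∀ (fs : List Bool) (c : Int), 0 ≤ c → c < 5 → pvAdd c fs = pvS c fs := by
  intro fs
  induction fs with
  | nil => intro c h0 h5; simp [pvAdd, pvS]; omega
  | cons f fs ih =>
      intro c h0 h5
      cases f with
      | false => simp [pvAdd, pvS, ih 0 le_rfl (by omega)]; omega
      | true =>
          by_cases h : c + 1 = 5
          · have hS : pvS c (true :: fs) = 1 + pvS 0 fs := by
              have h1 : pvS c (true :: fs) = pvS (c + 1) fs := by simp [pvS]
              rw [h1, show c + 1 = 0 + 5 by omega, pvS_add5]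
            simp [pvAdd, h, hS, ih 0 le_rfl (by omega)]
          · simp [pvAdd, pvS, h, ih (c + 1) (by omega) (by omega)]

-- B's run-sum loop computes pvS
theorem pv_sum_foldl (l : List Int) : ∀ (a : Int),
    l.foldl (fun s r => s + PySem.Int.floordiv r 5) a =
      a + (l.map (fun r => PySem.Int.floordiv r 5)).sum := by
  induction l with
  | nil => intro a; simp
  | cons r l ih => intro a; rw [List.foldl_cons, ih]; simp [List.map_cons]; ring

theorem pv_runs_spec : ∀ (fs : List Bool) (rs : List Int) (cur : Int),
    (((fs.foldl (fun (p : List Int × Int) f => if f then (p.1, p.2 + 1) else (p.1 ++ [p.2], 0)) (rs, cur)).1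
        ++ [(fs.foldl (fun (p : List Int × Int) f => if f then (p.1, p.2 + 1) else (p.1 ++ [p.2], 0)) (rs, cur)).2]).map
        (fun r => PySem.Int.floordiv r 5)).sum =
      (rs.map (fun r => PySem.Int.floordiv r 5)).sum + pvS cur fs := by
  intro fs
  induction fs with
  | nil =>
      intro rs cur
      simp [pvS]
  | cons f fs ih =>
      intro rs cur
      cases f with
      | true => simp only [List.foldl_cons, reduceIte]; rw [ih rs (cur + 1)]; simp [pvS]
      | false =>
          simp only [List.foldl_cons, Bool.false_eq_true, reduceIte]
          rw [ih (rs ++ [cur]) 0]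
          simp [pvS]
          ring

-- B's per-carton line count equals pvS 0 of the flags
theorem pv_lineasB (flags : List Bool) :
    (pvRunsB flags).foldl (fun s r => s + PySem.Int.floordiv r 5) 0 = pvS 0 flags := by
  rw [pvRunsB, pv_sum_foldl]
  simpa using pv_runs_spec flags [] 0

-- the per-carton dict update of A equals B's
theorem pv_carton_eq (sal usu : List String) (turno : Bool) (k : Int)
    (cells : List String) (d : PySem.Dict Int Int) :
    (cells.foldl (pvStepA sal usu turno k) ((0 : Int), (0 : Int), d)).2.2 =
      (let lineas := (pvRunsB (pvFlags sal usu turno cells)).foldl (fun s r => s + PySem.Int.floordiv r 5) 0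
       if 0 < lineas then d.insert k lineas else d) := by
  rw [pv_foldA_eq_foldF]
  obtain ⟨c', hc⟩ := pv_foldF_spec k (pvFlags sal usu turno cells) 0 0 d le_rfl
  simp only [lt_irrefl, if_false, zero_add] at hc
  rw [hc]
  have hl := pv_lineasB (pvFlags sal usu turno cells)
  simp only [pvAdd_eq_pvS _ 0 le_rfl (by omega), hl]

-- the matched flag as B's port writes it
theorem pvMatched_eq (sal usu : List String) (turno : Bool) :
    pvMatched sal usu turno = fun c => decide (c ∈ sal) && (!turno || decide (c ∈ usu)) := by
  funext c
  cases turno <;> simp [pvMatched]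

-- a list of length ≥ 3 starts with three elements
theorem pv_len3 {α : Type} (l : List α) (h : 3 ≤ l.length) :
    ∃ a b c t, l = a :: b :: c :: t := by
  match l with
  | a :: b :: c :: t => exact ⟨a, b, c, t, rfl⟩
  | [] | [_] | [_, _] => simp at h

-- ===== VERDICT (by name: the statement is the Claim_ definition above) =====
theorem guarda_lineas_ganadas_spec : Claim_equal_guarda_lineas_ganadas := by
  intro cartones sal usu gl cc turno _ hpre
  obtain ⟨hlen, hrows⟩ := hpre
  unfold Spec_guarda_lineas_ganadas guarda_lineas_ganadas guarda_lineas_ganadas_alt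
  congr 1
  apply PySem.List.foldl_congr_mem
  intro d x hx
  obtain ⟨h0, hltcc⟩ := (PySem.List.mem_pyRange_one).mp hx
  have hi : x.toNat < cartones.length := by omega
  have hget : PySem.List.pyGet? cartones x = some cartones[x.toNat] :=
    PySem.List.pyGet?_eq_some_getElem cartones h0 (by omega)
  have hmem : cartones[x.toNat] ∈ cartones.take cc.toNat := by
    have hlt' : x.toNat < (cartones.take cc.toNat).length := by simp; omega
    have hg := List.getElem_mem hlt'
    simpa [List.getElem_take] using hg
  obtain ⟨r0, r1, r2, rest, hceq⟩ := pv_len3 _ (hrows _ hmem)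
  have hr3 : PySem.List.pyRange 0 3 1 = [0, 1, 2] := by decide
  have g0 : PySem.List.pyGet? (r0 :: r1 :: r2 :: rest) (0 : Int) = some r0 := by
    simp [PySem.List.pyGet?, PySem.List.pyIdx?]
    rw [if_pos (by omega)]
    simp
  have g1 : PySem.List.pyGet? (r0 :: r1 :: r2 :: rest) (1 : Int) = some r1 := by
    simp [PySem.List.pyGet?, PySem.List.pyIdx?]
    rw [if_pos (by omega)]
    simp
  have g2 : PySem.List.pyGet? (r0 :: r1 :: r2 :: rest) (2 : Int) = some r2 := by
    simp [PySem.List.pyGet?, PySem.List.pyIdx?]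
    rw [if_pos (by omega)]
    simp
  simp only [hget, Option.getD_some, hceq, hr3, List.foldl_cons, List.foldl_nil,
    g0, g1, g2]
  rw [← List.foldl_append, ← List.foldl_append]
  rw [pv_carton_eq]
  simp [pvFlags, pvMatched_eq, List.filter_append, List.map_append]
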